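-- pv_equiv track=rewrite | github.com/proxikal/cerberus-mcp | src/cerberus/mutation/import_manager.py | _find_import_insertion_point
-- ===== SOURCE A (Python) =====
-- def _find_import_insertion_point(content: str, language: str) -> int:
--     """
--     Find the byte offset where imports should be inserted.
--
--     Args:
--         content: File content
--         language: Language name
--
--     Returns:
--         Byte offset for insertion
--     """
--     lines = content.split('\n')
--
--     # Find last import/require line
--     last_import_line = -1
--     for i, line in enumerate(lines):
--         stripped = line.strip()
--         if language == "python":
--             if stripped.startswith('import ') or stripped.startswith('from '):
--                 last_import_line = i
--         elif language in ["javascript", "typescript"]: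
--             if stripped.startswith('import ') or stripped.startswith('require('):
--                 last_import_line = i
--
--     # If imports found, insert after last import
--     if last_import_line >= 0:
--         # Calculate byte offset
--         offset = sum(len(line) + 1 for line in lines[:last_import_line + 1])
--         return offset
--
--     # Otherwise, insert at beginning (after shebang/docstring if present)
--     # Simplified: insert at beginning
--     return 0
-- ===== SOURCE B (Python) =====
-- def _find_import_insertion_point(content: str, language: str) -> int:
--     # Single pass: thread a running byte offset; remember the offset just past
--     # the most recent import line. Default 0 if none seen.
--     result = 0
--     offset = 0
--     for line in content.split('\n'):
--         stripped = line.strip()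
--         if language == "python":
--             if stripped.startswith('import ') or stripped.startswith('from '):
--                 result = offset + len(line) + 1
--         elif language in ["javascript", "typescript"]:
--             if stripped.startswith('import ') or stripped.startswith('require('):
--                 result = offset + len(line) + 1
--         offset += len(line) + 1
--     return result
-- ===== Notes on version B (the rewrite author's own statement) =====
-- stated objective: simpler
-- what changed: Replaces the find-last-index-via-enumerate then re-sum-prefix-of-lines structure with one pass that threads a running byte offset and records offset+len(line)+1 whenever an import line is seen.
import Mathlib
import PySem

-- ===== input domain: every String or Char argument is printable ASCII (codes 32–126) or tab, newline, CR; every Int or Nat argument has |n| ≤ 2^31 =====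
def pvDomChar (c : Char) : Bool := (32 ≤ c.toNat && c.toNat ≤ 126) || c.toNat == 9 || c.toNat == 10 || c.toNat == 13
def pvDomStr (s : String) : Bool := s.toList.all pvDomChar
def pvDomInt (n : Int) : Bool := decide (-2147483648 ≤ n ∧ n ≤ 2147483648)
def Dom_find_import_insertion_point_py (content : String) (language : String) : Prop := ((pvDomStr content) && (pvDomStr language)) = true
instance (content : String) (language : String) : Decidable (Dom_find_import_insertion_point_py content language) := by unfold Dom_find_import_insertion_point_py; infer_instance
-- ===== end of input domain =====

-- B replaces A's find-last-import-index pass plus a second prefix-sum pass by a single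
-- pass that threads a running byte offset (objective: simpler, same O(n) cost).

-- ===== PORT A =====
-- A: enumerate the lines to find the index of the last import line, then sum
-- len(line)+1 over the prefix of lines up to and including it (0 if none).
def find_import_insertion_point_py (content : String) (language : String) : Int :=
  let lines := (PySem.Str.split? content "\n").getD []
  let last_import_line : Int :=
    (PySem.List.enumerate lines 0).foldl (fun last_import_line il =>
      let stripped := PySem.Str.strip il.2
      if language == "python" then
        if PySem.Str.startswith stripped "import " || PySem.Str.startswith stripped "from " then
          il.1
        else last_import_line
      else if language == "javascript" || language == "typescript" then
        if PySem.Str.startswith stripped "import " || PySem.Str.startswith stripped "require(" then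
          il.1
        else last_import_line
      else last_import_line) (-1)
  if last_import_line ≥ 0 then
    (PySem.List.slice lines none (some (last_import_line + 1))).foldl
      (fun offset line => offset + (PySem.Str.len line + 1)) 0
  else 0

-- ===== PORT B =====
-- B: one pass threading (result, running offset); on an import line record
-- offset + len(line) + 1 into result; always advance the offset.
def find_import_insertion_point_py_alt (content : String) (language : String) : Int :=
  (((PySem.Str.split? content "\n").getD []).foldl (fun st line =>
      let stripped := PySem.Str.strip line
      let result :=
        if language == "python" then
          if PySem.Str.startswith stripped "import " || PySem.Str.startswith stripped "from " then
            st.2 + PySem.Str.len line + 1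
          else st.1
        else if language == "javascript" || language == "typescript" then
          if PySem.Str.startswith stripped "import " || PySem.Str.startswith stripped "require(" then
            st.2 + PySem.Str.len line + 1
          else st.1
        else st.1
      (result, st.2 + (PySem.Str.len line + 1))) ((0 : Int), (0 : Int))).1

-- ===== PRECONDITION & SPEC =====
def Spec_find_import_insertion_point_py (content : String) (language : String) (out : Int) : Prop := out = find_import_insertion_point_py_alt content language
instance (content : String) (language : String) (out : Int) : Decidable (Spec_find_import_insertion_point_py content language out) := by unfold Spec_find_import_insertion_point_py; infer_instance

-- ===== CLAIM (what is proved, stated in full; the proofs are below) =====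
def Claim_equal_find_import_insertion_point_py : Prop := ∀ (content : String) (language : String), Dom_find_import_insertion_point_py content language → Spec_find_import_insertion_point_py content language (find_import_insertion_point_py content language)

-- ===== LEMMAS AND PROOFS =====

-- the shared import-line test (proof-side abstraction of the identical branch code)
def pvHit (language line : String) : Bool :=
  let stripped := PySem.Str.strip line
  if language == "python" then
    PySem.Str.startswith stripped "import " || PySem.Str.startswith stripped "from "
  else if language == "javascript" || language == "typescript" then
    PySem.Str.startswith stripped "import " || PySem.Str.startswith stripped "require("
  else false

def pvSumLen (ls : List String) : Int := (ls.map (fun l => PySem.Str.len l + 1)).sum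

-- offset from the start of the list to just past the LAST hit line, none if no hit
def pvG (p : String → Bool) : List String → Option Int
  | [] => none
  | l :: ls =>
    match pvG p ls with
    | some v => some (PySem.Str.len l + 1 + v)
    | none => if p l then some (PySem.Str.len l + 1) else none

lemma pvSumLen_nil : pvSumLen [] = 0 := rfl

lemma pvSumLen_cons (l : String) (ls : List String) :
    pvSumLen (l :: ls) = (PySem.Str.len l + 1) + pvSumLen ls := by
  simp [pvSumLen]

lemma pvSumLen_append (ls ms : List String) :
    pvSumLen (ls ++ ms) = pvSumLen ls + pvSumLen ms := by
  simp [pvSumLen]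

lemma pvG_append_singleton (p : String → Bool) (ls : List String) (l : String) :
    pvG p (ls ++ [l]) =
      if p l then some (pvSumLen ls + (PySem.Str.len l + 1)) else pvG p ls := by
  induction ls with
  | nil => simp [pvG, pvSumLen_nil]
  | cons a as ih =>
    simp only [List.cons_append, pvG, ih, pvSumLen_cons]
    by_cases hp : p l
    · simp only [hp, if_true]
      cases pvG p as <;> · simp; ring
    · simp [hp]

-- B's fold, characterized by pvG
lemma pvB_char (p : String → Bool) (ls : List String) (r off : Int) :
    (ls.foldl (fun st line =>
        ((if p line then st.2 + PySem.Str.len line + 1 else st.1),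
          st.2 + (PySem.Str.len line + 1))) (r, off)).1 =
      match pvG p ls with
      | some v => off + v
      | none => r := by
  induction ls generalizing r off with
  | nil => simp [pvG]
  | cons l ls ih =>
    simp only [List.foldl_cons, ih, pvG]
    cases h : pvG p ls with
    | some v => simp; ring
    | none =>
      by_cases hp : p l <;> simp [hp] <;> ring

-- A's last-index fold, shifted by an arbitrary enumeration start
lemma pvLast_append (p : String → Bool) (ls : List String) (l : String) (s acc : Int) :
    (PySem.List.enumerate (ls ++ [l]) s).foldl
        (fun (a : Int) (il : Int × String) => if p il.2 then il.1 else a) acc =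
      if p l then s + ls.length
      else (PySem.List.enumerate ls s).foldl (fun (a : Int) (il : Int × String) => if p il.2 then il.1 else a) acc := by
  rw [PySem.List.enumerate_append, List.foldl_append]
  by_cases hp : p l <;> simp [PySem.List.enumerate_cons, PySem.List.enumerate_nil, hp]

-- A's last index vs pvG: either both say "no hit", or the prefix sum up to the
-- last index is exactly pvG's value
lemma pvA_char (p : String → Bool) (ls : List String) :
    (pvG p ls = none →
        (PySem.List.enumerate ls 0).foldl (fun (a : Int) (il : Int × String) => if p il.2 then il.1 else a) (-1) = -1) ∧
    (∀ v, pvG p ls = some v →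
        0 ≤ (PySem.List.enumerate ls 0).foldl (fun (a : Int) (il : Int × String) => if p il.2 then il.1 else a) (-1) ∧
        ((PySem.List.enumerate ls 0).foldl (fun (a : Int) (il : Int × String) => if p il.2 then il.1 else a) (-1)).toNat
          < ls.length ∧
        pvSumLen (ls.take
          (((PySem.List.enumerate ls 0).foldl (fun (a : Int) (il : Int × String) => if p il.2 then il.1 else a) (-1)).toNat + 1)) = v) := by
  induction ls using List.reverseRecOn with
  | nil => simp [pvG, PySem.List.enumerate_nil]
  | append_singleton ls l ih =>
    rw [pvLast_append p ls l 0 (-1), pvG_append_singleton]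
    by_cases hp : p l
    · simp only [hp, if_true]
      refine ⟨by simp, ?_⟩
      intro v hv
      injection hv with hv
      have h1 : ((0 : Int) + (ls.length : Int)).toNat = ls.length := by omega
      refine ⟨by positivity, ?_, ?_⟩
      · simp only [h1]; simp
      · rw [h1]
        rw [List.take_of_length_le (by simp)]
        rw [pvSumLen_append, ← hv]
        simp [pvSumLen_cons, pvSumLen_nil]
    · simp only [hp, Bool.false_eq_true, if_false]
      refine ⟨fun h => ih.1 h, ?_⟩
      intro v hv
      obtain ⟨h0, hlt, hsum⟩ := ih.2 v hv
      refine ⟨h0, by simp; omega, ?_⟩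
      rw [List.take_append_of_le_length (by omega)]
      exact hsum

-- both ports' inline branch code is the nested-if form of pvHit applied pointwise
lemma pvHit_if (language line : String) (x y : Int) :
    (if language == "python" then
        if PySem.Str.startswith (PySem.Str.strip line) "import "
            || PySem.Str.startswith (PySem.Str.strip line) "from " then x else y
      else if language == "javascript" || language == "typescript" then
        if PySem.Str.startswith (PySem.Str.strip line) "import "
            || PySem.Str.startswith (PySem.Str.strip line) "require(" then x else y
      else y) =
    (if pvHit language line then x else y) := by
  simp only [pvHit]
  split_ifs <;> simp_all

-- ===== VERDICT (by name: the statement is the Claim_ definition above) =====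
theorem find_import_insertion_point_py_spec : Claim_equal_find_import_insertion_point_py := by
  intro content language _
  unfold Spec_find_import_insertion_point_py
  unfold find_import_insertion_point_py find_import_insertion_point_py_alt
  set ls := (PySem.Str.split? content "\n").getD [] with hls
  simp only [pvHit_if]
  rw [pvB_char (pvHit language) ls 0 0]
  have hA := pvA_char (pvHit language) ls
  cases hg : pvG (pvHit language) ls with
  | none =>
    rw [hA.1 hg]
    norm_num
  | some v =>
    obtain ⟨h0, hlt, hsum⟩ := hA.2 v hg
    set j := (PySem.List.enumerate ls 0).foldl
      (fun a il => if pvHit language il.2 then il.1 else a) (-1) with hj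
    rw [if_pos (by omega)]
    rw [PySem.List.slice_to ls (b := j + 1) (by omega)]
    have ht : (j + 1).toNat = j.toNat + 1 := by omega
    rw [ht]
    rw [PySem.List.foldl_add (ls.take (j.toNat + 1)) (fun l => PySem.Str.len l + 1) 0]
    simp only [zero_add]
    rw [show ((ls.take (j.toNat + 1)).map fun l => PySem.Str.len l + 1).sum
        = pvSumLen (ls.take (j.toNat + 1)) from rfl]
    rw [hsum]
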